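-- pv_equiv track=rewrite | github.com/dynatrace-wwse/codespaces-framework | sync/commands/approve.py | _get_ci_status
-- ===== SOURCE A (Python) =====
-- def _get_ci_status(pr: dict) -> str:
--     """Determine CI status from PR check rollup. Returns 'passing', 'failing', 'pending', or 'none'."""
--     checks = pr.get("statusCheckRollup", [])
--     if not checks:
--         return "none"
--
--     states = set()
--     for check in checks:
--         # Handle both CheckRun and StatusContext
--         conclusion = check.get("conclusion", "")
--         status = check.get("status", "")
--
--         if conclusion in ("SUCCESS", "NEUTRAL", "SKIPPED"):
--             states.add("pass")
--         elif conclusion in ("FAILURE", "CANCELLED", "TIMED_OUT", "ACTION_REQUIRED"):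
--             states.add("fail")
--         elif status in ("IN_PROGRESS", "QUEUED", "PENDING", "WAITING"):
--             states.add("pending")
--         elif conclusion == "":
--             states.add("pending")
--         else:
--             states.add("unknown")
--
--     if "fail" in states:
--         return "failing"
--     if "pending" in states:
--         return "pending"
--     if "pass" in states:
--         return "passing"
--     return "none"
-- ===== SOURCE B (Python) =====
-- # Priority-ordered scans instead of one set-building pass: per-check predicates,
-- # then early-return failing / pending / passing in priority order.
-- FAIL_CONCLUSIONS = ("FAILURE", "CANCELLED", "TIMED_OUT", "ACTION_REQUIRED")
-- PASS_CONCLUSIONS = ("SUCCESS", "NEUTRAL", "SKIPPED")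
-- PENDING_STATUSES = ("IN_PROGRESS", "QUEUED", "PENDING", "WAITING")
--
--
-- def _is_fail(check):
--     return check.get("conclusion", "") in FAIL_CONCLUSIONS
--
--
-- def _is_pass(check):
--     return check.get("conclusion", "") in PASS_CONCLUSIONS
--
--
-- def _is_pending(check):
--     return (not _is_pass(check) and not _is_fail(check)
--             and (check.get("status", "") in PENDING_STATUSES
--                  or check.get("conclusion", "") == ""))
--
--
-- def _get_ci_status(pr: dict) -> str:
--     """Determine CI status from PR check rollup. Returns 'passing', 'failing', 'pending', or 'none'."""
--     checks = pr.get("statusCheckRollup", [])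
--     if not checks:
--         return "none"
--     if any(_is_fail(c) for c in checks):
--         return "failing"
--     if any(_is_pending(c) for c in checks):
--         return "pending"
--     if any(_is_pass(c) for c in checks):
--         return "passing"
--     return "none"
-- ===== Notes on version B (the rewrite author's own statement) =====
-- stated objective: alternative
-- what changed: Replaced A's single set-building pass plus membership tests with per-check classification predicates and priority-ordered early-return any() scans that maintain no state.
import Mathlib
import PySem

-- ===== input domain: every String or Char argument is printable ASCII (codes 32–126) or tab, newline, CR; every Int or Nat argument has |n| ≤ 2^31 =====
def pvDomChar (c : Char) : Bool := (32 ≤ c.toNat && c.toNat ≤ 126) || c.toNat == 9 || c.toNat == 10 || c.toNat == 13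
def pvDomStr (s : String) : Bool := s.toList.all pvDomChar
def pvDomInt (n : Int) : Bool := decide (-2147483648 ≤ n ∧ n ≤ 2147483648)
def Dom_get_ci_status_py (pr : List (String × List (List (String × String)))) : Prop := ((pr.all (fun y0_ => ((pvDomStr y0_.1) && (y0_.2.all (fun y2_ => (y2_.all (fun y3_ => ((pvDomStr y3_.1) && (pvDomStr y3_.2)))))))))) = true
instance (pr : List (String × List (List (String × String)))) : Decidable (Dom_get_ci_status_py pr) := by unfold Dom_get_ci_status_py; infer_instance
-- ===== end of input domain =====

-- B replaces A's set-building loop by stateless priority-ordered any-scans (alternative decomposition, same cost).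

-- check.get("conclusion", "") and check.get("status", ""), shared accessors
def pvConc (check : List (String × String)) : String := PySem.Dict.getD ⟨check⟩ "conclusion" ""
def pvStat (check : List (String × String)) : String := PySem.Dict.getD ⟨check⟩ "status" ""

-- ===== PORT A =====
-- loop body of A: classify one check and add its class to the states set
def pvStepA (states : PySem.Set String) (check : List (String × String)) : PySem.Set String :=
  if pvConc check == "SUCCESS" || pvConc check == "NEUTRAL" || pvConc check == "SKIPPED" then
    PySem.Set.add states "pass"
  else if pvConc check == "FAILURE" || pvConc check == "CANCELLED" || pvConc check == "TIMED_OUT" || pvConc check == "ACTION_REQUIRED" then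
    PySem.Set.add states "fail"
  else if pvStat check == "IN_PROGRESS" || pvStat check == "QUEUED" || pvStat check == "PENDING" || pvStat check == "WAITING" then
    PySem.Set.add states "pending"
  else if pvConc check == "" then
    PySem.Set.add states "pending"
  else
    PySem.Set.add states "unknown"

def get_ci_status_py (pr : List (String × List (List (String × String)))) : String :=
  let checks := PySem.Dict.getD ⟨pr⟩ "statusCheckRollup" []
  if checks.isEmpty then "none"
  else
    let states := checks.foldl pvStepA PySem.Set.empty
    if PySem.Set.contains states "fail" then "failing"
    else if PySem.Set.contains states "pending" then "pending"
    else if PySem.Set.contains states "pass" then "passing"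
    else "none"

-- ===== PORT B =====
def pvIsFail (check : List (String × String)) : Bool :=
  pvConc check == "FAILURE" || pvConc check == "CANCELLED" || pvConc check == "TIMED_OUT" || pvConc check == "ACTION_REQUIRED"

def pvIsPass (check : List (String × String)) : Bool :=
  pvConc check == "SUCCESS" || pvConc check == "NEUTRAL" || pvConc check == "SKIPPED"

def pvIsPending (check : List (String × String)) : Bool :=
  !(pvIsPass check) && !(pvIsFail check) &&
    ((pvStat check == "IN_PROGRESS" || pvStat check == "QUEUED" || pvStat check == "PENDING" || pvStat check == "WAITING")
     || pvConc check == "")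

def get_ci_status_py_alt (pr : List (String × List (List (String × String)))) : String :=
  let checks := PySem.Dict.getD ⟨pr⟩ "statusCheckRollup" []
  if checks.isEmpty then "none"
  else if checks.any pvIsFail then "failing"
  else if checks.any pvIsPending then "pending"
  else if checks.any pvIsPass then "passing"
  else "none"

-- ===== PRECONDITION & SPEC =====
def Spec_get_ci_status_py (pr : List (String × List (List (String × String)))) (out : String) : Prop := out = get_ci_status_py_alt pr
instance (pr : List (String × List (List (String × String)))) (out : String) : Decidable (Spec_get_ci_status_py pr out) := by unfold Spec_get_ci_status_py; infer_instance

-- ===== CLAIM (what is proved, stated in full; the proofs are below) =====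
def Claim_equal_get_ci_status_py : Prop := ∀ (pr : List (String × List (List (String × String)))), Dom_get_ci_status_py pr → Spec_get_ci_status_py pr (get_ci_status_py pr)

-- ===== LEMMAS AND PROOFS =====
-- the class string A's loop body adds for one check
def pvClassA (check : List (String × String)) : String :=
  if pvConc check == "SUCCESS" || pvConc check == "NEUTRAL" || pvConc check == "SKIPPED" then "pass"
  else if pvConc check == "FAILURE" || pvConc check == "CANCELLED" || pvConc check == "TIMED_OUT" || pvConc check == "ACTION_REQUIRED" then "fail"
  else if pvStat check == "IN_PROGRESS" || pvStat check == "QUEUED" || pvStat check == "PENDING" || pvStat check == "WAITING" then "pending"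
  else if pvConc check == "" then "pending"
  else "unknown"

theorem pvStepA_eq (s : PySem.Set String) (c : List (String × String)) :
    pvStepA s c = PySem.Set.add s (pvClassA c) := by
  unfold pvStepA pvClassA
  split
  · rfl
  · split
    · rfl
    · split
      · rfl
      · split <;> rfl

theorem mem_foldl_stepA (x : String) (checks : List (List (String × String)))
    (s : PySem.Set String) :
    x ∈ checks.foldl pvStepA s ↔ x ∈ s ∨ ∃ c ∈ checks, pvClassA c = x := by
  induction checks generalizing s with
  | nil => simp
  | cons c cs ih =>
    simp only [List.foldl_cons, pvStepA_eq, ih, PySem.Set.mem_add, List.mem_cons]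
    constructor
    · rintro (⟨h | h⟩ | ⟨d, hd, hx⟩)
      · exact Or.inl h
      · exact Or.inr ⟨c, Or.inl rfl, h.symm⟩
      · exact Or.inr ⟨d, Or.inr hd, hx⟩
    · rintro (h | ⟨d, (rfl | hd), hx⟩)
      · exact Or.inl (Or.inl h)
      · exact Or.inl (Or.inr hx.symm)
      · exact Or.inr ⟨d, hd, hx⟩

theorem pvClassA_fail (c : List (String × String)) :
    pvClassA c = "fail" ↔ pvIsFail c = true := by
  unfold pvClassA pvIsFail
  split
  · rename_i h
    refine iff_of_false (by decide) ?_
    intro hf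
    simp only [Bool.or_eq_true, beq_iff_eq] at h hf
    obtain (h | h) | h := h <;> rw [h] at hf <;> revert hf <;> decide
  · split
    · rename_i _ h
      exact iff_of_true rfl h
    · rename_i _ hnf
      refine iff_of_false ?_ hnf
      intro hc
      split at hc
      · exact absurd hc (by decide)
      · split at hc
        · exact absurd hc (by decide)
        · exact absurd hc (by decide)

theorem pvClassA_pending (c : List (String × String)) :
    pvClassA c = "pending" ↔ pvIsPending c = true := by
  unfold pvClassA pvIsPending pvIsPass pvIsFail
  split
  · rename_i h
    refine iff_of_false (by decide) ?_
    intro hf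
    simp only [Bool.and_eq_true, Bool.not_eq_true'] at hf
    rw [hf.1.1] at h
    exact absurd h (by decide)
  · split
    · rename_i _ h
      refine iff_of_false (by decide) ?_
      intro hf
      simp only [Bool.and_eq_true, Bool.not_eq_true'] at hf
      rw [hf.1.2] at h
      exact absurd h (by decide)
    · rename_i hnp hnf
      simp only [Bool.not_eq_true] at hnp hnf
      simp only [hnp, hnf, Bool.not_false, Bool.true_and]
      split
      · rename_i h
        simp [h]
      · split
        · rename_i _ h
          simp [h]
        · rename_i hs hcnil
          refine iff_of_false (by decide) ?_
          intro hf
          rw [Bool.or_eq_true] at hf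
          rcases hf with h | h
          · exact hs h
          · exact hcnil h

theorem pvClassA_pass (c : List (String × String)) :
    pvClassA c = "pass" ↔ pvIsPass c = true := by
  unfold pvClassA pvIsPass
  split
  · rename_i h
    exact iff_of_true rfl h
  · rename_i hnp
    refine iff_of_false ?_ hnp
    intro hc
    split at hc
    · exact absurd hc (by decide)
    · split at hc
      · exact absurd hc (by decide)
      · split at hc
        · exact absurd hc (by decide)
        · exact absurd hc (by decide)

theorem contains_states (key : String) (P : List (String × String) → Bool)
    (hP : ∀ c, pvClassA c = key ↔ P c = true)
    (checks : List (List (String × String))) :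
    PySem.Set.contains (checks.foldl pvStepA PySem.Set.empty) key = checks.any P := by
  rcases h : checks.any P
  · rw [Bool.eq_false_iff]
    intro hcon
    rw [PySem.Set.contains_iff, mem_foldl_stepA] at hcon
    rcases hcon with hcon | ⟨c, hc, hx⟩
    · simp [PySem.Set.empty] at hcon
    · rw [← Bool.not_eq_true, List.any_eq_true] at h
      exact h ⟨c, hc, (hP c).mp hx⟩
  · rw [List.any_eq_true] at h
    obtain ⟨c, hc, hPc⟩ := h
    rw [PySem.Set.contains_iff, mem_foldl_stepA]
    exact Or.inr ⟨c, hc, (hP c).mpr hPc⟩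

-- ===== VERDICT (by name: the statement is the Claim_ definition above) =====
theorem get_ci_status_py_spec : Claim_equal_get_ci_status_py := by
  intro pr _
  unfold Spec_get_ci_status_py get_ci_status_py get_ci_status_py_alt
  set checks := PySem.Dict.getD ⟨pr⟩ "statusCheckRollup" [] with hchecks
  by_cases he : checks.isEmpty
  · simp [he]
  · simp only [he]
    rw [contains_states "fail" pvIsFail pvClassA_fail,
        contains_states "pending" pvIsPending pvClassA_pending,
        contains_states "pass" pvIsPass pvClassA_pass]
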